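-- pv_equiv track=rewrite | github.com/Kari-Genomics-Lab/Extreme_Env | code/Important_kmers.py | kmer2idx
-- ===== SOURCE A (Python) =====
-- def kmer2idx(kmer, reduce=False):
--     encoding = {'A':0, 'C':1, 'G':2, 'T':3}
--     size = (1 << (2 * len(kmer))) - 1
--
--     idx = 0
--     for i in range(len(kmer)):
--         bp = kmer[i]
--         bp_code = encoding[bp]
--         idx = ((idx << 2) | bp_code) & size
--
--     return idx
-- ===== SOURCE B (Python) =====
-- def kmer2idx(kmer, reduce=False):
--     encoding = {'A': '0', 'C': '1', 'G': '2', 'T': '3'}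
--     # map each base to its base-4 digit character and let int() do the
--     # positional accumulation; the leading '0' makes the empty kmer yield 0
--     return int('0' + ''.join(encoding[bp] for bp in kmer), 4)
-- ===== Notes on version B (the rewrite author's own statement) =====
-- stated objective: idiomatic
-- what changed: Replaces the manual shift-or-mask Horner loop with a translation of each base to a base-4 digit character followed by a single int(digits, 4) library parse (with a leading '0' so the empty kmer still gives 0).
import Mathlib
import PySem

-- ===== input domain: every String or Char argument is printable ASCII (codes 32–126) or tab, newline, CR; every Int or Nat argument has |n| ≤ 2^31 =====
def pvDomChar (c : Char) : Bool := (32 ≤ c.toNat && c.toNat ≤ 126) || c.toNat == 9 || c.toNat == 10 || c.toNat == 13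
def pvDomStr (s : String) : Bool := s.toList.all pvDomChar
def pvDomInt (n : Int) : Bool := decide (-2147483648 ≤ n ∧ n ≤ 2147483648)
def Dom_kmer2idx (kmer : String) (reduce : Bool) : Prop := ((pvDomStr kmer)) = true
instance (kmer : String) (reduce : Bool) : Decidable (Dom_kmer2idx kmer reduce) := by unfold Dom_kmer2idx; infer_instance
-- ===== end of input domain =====

-- B replaces A's manual shift-or-mask Horner loop by mapping each base to its base-4
-- digit character and parsing the digit string once in base 4 (objective: idiomatic).
-- Both Pythons raise KeyError on characters outside ACGT; Pre_ excludes exactly those.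

-- ===== PORT A =====
-- encoding = {'A':0, 'C':1, 'G':2, 'T':3}
def pvEncA : PySem.Dict Char Int := PySem.Dict.ofList [('A', 0), ('C', 1), ('G', 2), ('T', 3)]

def kmer2idx (kmer : String) (reduce : Bool) : Int :=
  let n := kmer.toList.length
  let size : Int := ((1 : Int) <<< (2 * n)) - 1
  (PySem.List.pyRange 0 (n : Int) 1).foldl
    (fun idx i =>
      let bp := PySem.List.pyGetD kmer.toList i ' '      -- i is always in range inside this loop
      let bpCode := (pvEncA.get? bp).getD 0              -- none = KeyError, excluded by Pre_
      PySem.Int.band (PySem.Int.bor (idx <<< (2 : Nat)) bpCode) size) 0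

-- ===== PORT B =====
-- encoding = {'A':'0', 'C':'1', 'G':'2', 'T':'3'}
def pvEncB : PySem.Dict Char Char := PySem.Dict.ofList [('A', '0'), ('C', '1'), ('G', '2'), ('T', '3')]

-- hand port of int(s, 4): positional left-to-right parse of base-4 digit characters;
-- exact for the strings B builds (only digits '0'..'3', leading '0' present)
def pvParse4 : List Char → Int → Int
  | [], acc => acc
  | d :: rest, acc => pvParse4 rest (acc * 4 + ((d.toNat : Int) - 48))

def kmer2idx_alt (kmer : String) (reduce : Bool) : Int :=
  let digits := kmer.toList.map (fun bp => (pvEncB.get? bp).getD '0')   -- none = KeyError, excluded by Pre_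
  pvParse4 ('0' :: digits) 0

-- ===== PRECONDITION & SPEC =====
-- Pre_ excludes exactly the kmers containing a character outside {A,C,G,T}, on which A (and B) raise KeyError.
def Pre_kmer2idx (kmer : String) (reduce : Bool) : Prop :=
  kmer.toList.all (fun c => c == 'A' || c == 'C' || c == 'G' || c == 'T') = true
instance (kmer : String) (reduce : Bool) : Decidable (Pre_kmer2idx kmer reduce) := by
  unfold Pre_kmer2idx; infer_instance

def pvWitness_kmer2idx : String × Bool := ("ACG", false)

def Spec_kmer2idx (kmer : String) (reduce : Bool) (out : Int) : Prop := out = kmer2idx_alt kmer reduce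
instance (kmer : String) (reduce : Bool) (out : Int) : Decidable (Spec_kmer2idx kmer reduce out) := by
  unfold Spec_kmer2idx; infer_instance

-- ===== CLAIM (what is proved, stated in full; the proofs are below) =====
def Claim_equal_kmer2idx : Prop := ∀ (kmer : String) (reduce : Bool), Dom_kmer2idx kmer reduce → Pre_kmer2idx kmer reduce → Spec_kmer2idx kmer reduce (kmer2idx kmer reduce)

-- ===== LEMMAS AND PROOFS =====

-- one masked shift-or step on a nonnegative accumulator is Horner's step, as Nats
lemma pv_step_eq (m r N : Nat) (hr : r < 4) (h : m * 4 + r < 2 ^ (2 * N)) :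
    PySem.Int.band (PySem.Int.bor ((m : Int) <<< (2 : Nat)) (r : Int)) (((1 : Int) <<< (2 * N)) - 1)
      = ((m * 4 + r : Nat) : Int) := by
  have h1 : ((m : Int) <<< (2 : Nat)) = ((m <<< 2 : Nat) : Int) := by
    simp [Int.shiftLeft_eq, Nat.shiftLeft_eq]
  have h2 : (((1 : Int) <<< (2 * N)) - 1) = ((2 ^ (2 * N) - 1 : Nat) : Int) := by
    have : (1 : Nat) ≤ 2 ^ (2 * N) := Nat.one_le_two_pow
    push_cast [Int.shiftLeft_eq, this]
    ring
  rw [h1, h2, PySem.Int.bor_natCast, PySem.Int.band_natCast]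
  congr 1
  have hor : (m <<< 2) ||| r = m * 4 + r := by
    rw [← Nat.shiftLeft_add_eq_or_of_lt (by omega : r < 2 ^ 2), Nat.shiftLeft_eq]
  rw [hor, Nat.and_two_pow_sub_one_eq_mod, Nat.mod_eq_of_lt h]

-- the base-4 digit of a valid base character, shared by both ports
def pvCode (c : Char) : Nat :=
  if c = 'A' then 0 else if c = 'C' then 1 else if c = 'G' then 2 else 3

lemma pv_codeA (c : Char) (hc : c = 'A' ∨ c = 'C' ∨ c = 'G' ∨ c = 'T') :
    (pvEncA.get? c).getD 0 = (pvCode c : Int) := by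
  rcases hc with h | h | h | h <;> subst h <;> decide

lemma pv_codeB (c : Char) (hc : c = 'A' ∨ c = 'C' ∨ c = 'G' ∨ c = 'T') :
    (((pvEncB.get? c).getD '0').toNat : Int) - 48 = (pvCode c : Int) := by
  rcases hc with h | h | h | h <;> subst h <;> decide

lemma pv_code_lt (c : Char) : pvCode c < 4 := by
  unfold pvCode; split_ifs <;> omega

-- pvParse4 is a left fold
lemma pvParse4_eq_foldl (cs : List Char) (acc : Int) :
    pvParse4 cs acc = cs.foldl (fun a d => a * 4 + ((d.toNat : Int) - 48)) acc := by
  induction cs generalizing acc with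
  | nil => rfl
  | cons d rest ih => simp [pvParse4, ih]

-- A's masked loop computes the plain Horner fold, for any accumulator small enough
lemma pv_loop (cs : List Char) (N m : Nat)
    (hall : ∀ c ∈ cs, c = 'A' ∨ c = 'C' ∨ c = 'G' ∨ c = 'T')
    (hb : (m + 1) * 4 ^ cs.length ≤ 2 ^ (2 * N)) :
    cs.foldl (fun idx c =>
        PySem.Int.band (PySem.Int.bor (idx <<< (2 : Nat)) ((pvEncA.get? c).getD 0))
          (((1 : Int) <<< (2 * N)) - 1)) (m : Int)
      = cs.foldl (fun a c => a * 4 + (pvCode c : Int)) (m : Int) := by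
  induction cs generalizing m with
  | nil => rfl
  | cons c rest ih =>
    have hc := hall c (List.mem_cons_self ..)
    have hrest : ∀ x ∈ rest, x = 'A' ∨ x = 'C' ∨ x = 'G' ∨ x = 'T' :=
      fun x hx => hall x (List.mem_cons_of_mem _ hx)
    have hlt : pvCode c < 4 := pv_code_lt c
    have hpow : (1 : Nat) ≤ 4 ^ rest.length := Nat.one_le_pow _ _ (by omega)
    have hb' : (m * 4 + pvCode c + 1) * 4 ^ rest.length ≤ 2 ^ (2 * N) := by
      have : (m * 4 + pvCode c + 1) * 4 ^ rest.length ≤ (m + 1) * 4 ^ (rest.length + 1) := by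
        rw [pow_succ]; nlinarith
      simpa [List.length_cons] using le_trans this hb
    have hstep : m * 4 + pvCode c < 2 ^ (2 * N) := by nlinarith
    simp only [List.foldl_cons, pv_codeA c hc]
    rw [pv_step_eq m (pvCode c) N hlt hstep]
    have hcast : ((m * 4 + pvCode c : Nat) : Int) = (m : Int) * 4 + (pvCode c : Int) := by
      push_cast; ring
    rw [← hcast]
    exact ih (m * 4 + pvCode c) hrest (by simpa using hb')

-- ===== VERDICT (by name: the statement is the Claim_ definition above) =====
theorem kmer2idx_spec : Claim_equal_kmer2idx := by
  intro kmer reduce _ hpre0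
  have hpre : ∀ c ∈ kmer.toList, c = 'A' ∨ c = 'C' ∨ c = 'G' ∨ c = 'T' := by
    intro c hc
    have := List.all_eq_true.mp hpre0 c hc
    have h := this; simp at h; tauto
  unfold Spec_kmer2idx kmer2idx kmer2idx_alt
  simp only []
  rw [PySem.List.foldl_pyRange_zero_pyGetD' kmer.toList ' '
    (fun idx bp => PySem.Int.band (PySem.Int.bor (idx <<< (2 : Nat)) ((pvEncA.get? bp).getD 0))
      (((1 : Int) <<< (2 * kmer.toList.length)) - 1)) 0]
  rw [pvParse4_eq_foldl]
  simp only [List.foldl_cons, List.foldl_map]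
  have h0 : (0 : Int) * 4 + (('0'.toNat : Int) - 48) = (0 : Int) := by decide
  rw [h0]
  have hb : (0 + 1) * 4 ^ kmer.toList.length ≤ 2 ^ (2 * kmer.toList.length) := by
    rw [pow_mul]; norm_num
  have := pv_loop kmer.toList kmer.toList.length 0 hpre hb
  simp only [Nat.cast_zero] at this
  rw [this]
  apply PySem.List.foldl_congr_mem
  intro a c hc
  rw [pv_codeB c (hpre c hc)]
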